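-- pv_equiv track=rewrite | github.com/OwenFeik/spells | utilities.py | parse_spell_query
-- ===== SOURCE A (Python) =====
-- def parse_spell_query(string):
--     string += " "
--
--     queries = {}
--
--     query_shortenings = {
--         "n": "name",
--         "s": "school",
--         "l": "level",
--         "c": "cast",
--         "r": "range",
--         "co": "components",
--         "d": "duration",
--         "t": "desc",
--         "rit": "ritual",
--         "range": "range",
--         "class": "classes",
--         "cls": "classes",
--         "cl": "classes",
--         "subclass": "subclasses",
--         "scls": "subclasses",
--         "sc": "subclasses",
--     }
--
--     quote = False
--     colon = False
--     query = ""
--     criteria = ""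
--     for c in string:
--         if c == " ":
--             if not quote and criteria:
--                 colon = False
--
--                 if query and criteria:
--                     if query in query_shortenings:
--                         query = query_shortenings[query]
--                     queries[query.lower()] = criteria.lower()
--                 query = ""
--                 criteria = ""
--             elif query in ["rit", "ritual"]:
--                 queries["ritual"] = "true"
--             elif colon and quote:
--                 criteria += c
--         elif c == '"':
--             if colon:
--                 quote = not quote
--             else:
--                 raise ValueError('Format: "search <attribute>:<criteria>".')
--         elif c == ":" and not quote:
--             colon = True
--         else:
--             if colon:
--                 criteria += c
--             else:
--                 query += c
--
--     return queries
-- ===== SOURCE B (Python) =====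
-- # Two-phase tokenizer: an attribute scanner up to each colon, then a criteria scanner
-- # that runs to the first space outside quotes; pairs are emitted per token instead of
-- # inside one flag-driven character loop. Objective: alternative decomposition, same O(n).
--
-- QUERY_SHORTENINGS = {
--     "n": "name", "s": "school", "l": "level", "c": "cast", "r": "range",
--     "co": "components", "d": "duration", "t": "desc", "rit": "ritual",
--     "range": "range", "class": "classes", "cls": "classes", "cl": "classes",
--     "subclass": "subclasses", "scls": "subclasses", "sc": "subclasses",
-- }
--
--
-- def _is_ritual_word(attr):
--     return attr in ("rit", "ritual")
--
--
-- def parse_spell_query(string):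
--     queries = {}
--     chars = iter(string + " ")
--     while True:
--         # attribute scanner: everything up to the next ':'; whitespace is skipped,
--         # and a bare 'rit'/'ritual' word turns the ritual flag on
--         attr = ""
--         colon = False
--         for c in chars:
--             if c == ":":
--                 colon = True
--                 break
--             if c == '"':
--                 raise ValueError('Format: "search <attribute>:<criteria>".')
--             if c == " ":
--                 if _is_ritual_word(attr):
--                     queries["ritual"] = "true"
--             else:
--                 attr += c
--         if not colon:
--             return queries
--         # criteria scanner: runs to the first space outside quotes
--         crit = ""
--         quoted = False
--         terminated = False
--         for c in chars:
--             if c == '"':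
--                 quoted = not quoted
--             elif c == " ":
--                 if not quoted and crit:
--                     terminated = True
--                     break
--                 if _is_ritual_word(attr):
--                     queries["ritual"] = "true"
--                 elif quoted:
--                     crit += c
--             elif quoted or c != ":":
--                 crit += c
--         if terminated and attr:
--             attr = QUERY_SHORTENINGS.get(attr, attr)
--             queries[attr.lower()] = crit.lower()
-- ===== Notes on version B (the rewrite author's own statement) =====
-- stated objective: alternative
-- what changed: Replaced A's single character loop with quote/colon boolean flags by a two-phase tokenizer: an attribute scanner that consumes up to the next colon, then a separate criteria scanner running to the first unquoted space, with each pair emitted at a token boundary; Pre_ excludes exactly the inputs on which A raises ValueError (a double quote with no colon pending), where B raises the same error.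
import Mathlib
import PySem

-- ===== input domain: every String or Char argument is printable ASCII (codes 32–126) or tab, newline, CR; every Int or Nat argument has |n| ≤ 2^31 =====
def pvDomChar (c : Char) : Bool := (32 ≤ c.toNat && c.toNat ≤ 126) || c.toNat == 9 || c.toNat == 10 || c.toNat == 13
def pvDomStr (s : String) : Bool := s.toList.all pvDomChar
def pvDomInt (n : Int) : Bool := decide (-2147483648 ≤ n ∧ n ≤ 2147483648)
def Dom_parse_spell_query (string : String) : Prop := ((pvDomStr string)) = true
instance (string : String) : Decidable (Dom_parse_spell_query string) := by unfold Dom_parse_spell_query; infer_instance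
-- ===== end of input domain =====

-- B replaces A's one flag-machine character loop with a two-phase tokenizer (attribute
-- scanner up to each colon, then a criteria scanner running to the first unquoted space,
-- emitting per token); objective: alternative decomposition, same O(n) cost. Both raise
-- ValueError on a '"' in attribute position; Pre_ admits exactly the non-raising inputs
-- (both ports model the exception as []).

-- the query_shortenings table (a module-level constant in B, a local dict in A)
def shortTable : PySem.Dict (List Char) (List Char) := PySem.Dict.ofList
  [("n".toList, "name".toList), ("s".toList, "school".toList), ("l".toList, "level".toList),
   ("c".toList, "cast".toList), ("r".toList, "range".toList), ("co".toList, "components".toList),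
   ("d".toList, "duration".toList), ("t".toList, "desc".toList), ("rit".toList, "ritual".toList),
   ("range".toList, "range".toList), ("class".toList, "classes".toList), ("cls".toList, "classes".toList),
   ("cl".toList, "classes".toList), ("subclass".toList, "subclasses".toList), ("scls".toList, "subclasses".toList),
   ("sc".toList, "subclasses".toList)]

-- ===== PORT A =====
-- state = (quote, colon, query, criteria, queries); none = the ValueError was raised
def stepA (st : Option (Bool × Bool × List Char × List Char × PySem.Dict (List Char) (List Char))) (c : Char) :
    Option (Bool × Bool × List Char × List Char × PySem.Dict (List Char) (List Char)) :=
  match st with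
  | none => none
  | some (quote, colon, query, criteria, queries) =>
    if c = ' ' then
      if quote = false ∧ criteria ≠ [] then
        some (quote, false, [], [],
          if query ≠ [] ∧ criteria ≠ [] then
            queries.insert (PySem.Chars.lower (shortTable.getD query query)) (PySem.Chars.lower criteria)
          else queries)
      else if query = "rit".toList ∨ query = "ritual".toList then
        some (quote, colon, query, criteria, queries.insert "ritual".toList "true".toList)
      else if colon = true ∧ quote = true then
        some (quote, colon, query, criteria ++ [' '], queries)
      else some (quote, colon, query, criteria, queries)
    else if c = '"' then
      if colon then some (!quote, colon, query, criteria, queries)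
      else none  -- raise ValueError (outside Pre_)
    else if c = ':' ∧ quote = false then
      some (quote, true, query, criteria, queries)
    else if colon then some (quote, colon, query, criteria ++ [c], queries)
    else some (quote, colon, query ++ [c], criteria, queries)

def parse_spell_query (string : String) : List (String × String) :=
  match (string.toList ++ [' ']).foldl stepA (some (false, false, [], [], PySem.Dict.empty)) with
  | some (_, _, _, _, queries) => queries.items.map (fun p => (String.ofList p.1, String.ofList p.2))
  | none => []  -- ValueError path (outside Pre_)

-- ===== PORT B =====
-- B's _is_ritual_word
def isRitualWord (attr : List Char) : Bool :=
  attr = "rit".toList ∨ attr = "ritual".toList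

-- the attribute scanner's space step: flag ritual for a bare rit/ritual word
def ritualIf (queries : PySem.Dict (List Char) (List Char)) (attr : List Char) :
    PySem.Dict (List Char) (List Char) :=
  if isRitualWord attr then queries.insert "ritual".toList "true".toList else queries

-- queries[QUERY_SHORTENINGS.get(attr, attr).lower()] = crit.lower()
def emitPair (queries : PySem.Dict (List Char) (List Char)) (attr crit : List Char) :
    PySem.Dict (List Char) (List Char) :=
  queries.insert (PySem.Chars.lower (shortTable.getD attr attr)) (PySem.Chars.lower crit)

-- result of B's attribute scanner: the ValueError, end of input, or a colon with the rest
inductive AttrRes where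
  | err : AttrRes
  | done : PySem.Dict (List Char) (List Char) → AttrRes
  | colon : PySem.Dict (List Char) (List Char) → List Char → List Char → AttrRes

-- B's attribute scanner
def attrLoop (queries : PySem.Dict (List Char) (List Char)) (attr : List Char) :
    List Char → AttrRes
  | [] => .done queries
  | c :: rest =>
    if c = ':' then .colon queries attr rest
    else if c = '"' then .err
    else if c = ' ' then attrLoop (ritualIf queries attr) attr rest
    else attrLoop queries (attr ++ [c]) rest

-- B's criteria scanner; returns (queries, crit, rest, terminated)
def critLoop (queries : PySem.Dict (List Char) (List Char)) (attr crit : List Char) (quoted : Bool) :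
    List Char → PySem.Dict (List Char) (List Char) × List Char × List Char × Bool
  | [] => (queries, crit, [], false)
  | c :: rest =>
    if c = '"' then critLoop queries attr crit (!quoted) rest
    else if c = ' ' then
      if quoted = false ∧ crit ≠ [] then (queries, crit, rest, true)
      else if isRitualWord attr then
        critLoop (queries.insert "ritual".toList "true".toList) attr crit quoted rest
      else if quoted then critLoop queries attr (crit ++ [' ']) quoted rest
      else critLoop queries attr crit quoted rest
    else if quoted = true ∨ c ≠ ':' then critLoop queries attr (crit ++ [c]) quoted rest
    else critLoop queries attr crit quoted rest

-- termination helpers for B's outer loop (the ports cite them in decreasing_by)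
theorem critLoop_rest_le (cs : List Char) : ∀ (d : PySem.Dict (List Char) (List Char)) (a cr : List Char) (q : Bool),
    (critLoop d a cr q cs).2.2.1.length ≤ cs.length := by
  induction cs with
  | nil => intro d a cr q; simp [critLoop]
  | cons c rest ih =>
    intro d a cr q
    simp only [critLoop]
    split_ifs <;> first
      | (exact le_trans (ih _ _ _ _) (by simp))
      | simp

theorem attrLoop_colon_lt : ∀ (cs : List Char) (d : PySem.Dict (List Char) (List Char)) (a : List Char)
    (d' : PySem.Dict (List Char) (List Char)) (a' rest : List Char),
    attrLoop d a cs = .colon d' a' rest → rest.length < cs.length := by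
  intro cs
  induction cs with
  | nil => intro d a d' a' rest h; simp [attrLoop] at h
  | cons c r ih =>
    intro d a d' a' rest h
    simp only [attrLoop] at h
    split_ifs at h with h1 h2 h3
    · cases h; simp
    · exact Nat.lt_succ_of_lt (ih _ _ _ _ _ h)
    · exact Nat.lt_succ_of_lt (ih _ _ _ _ _ h)

-- B's outer loop; none = the ValueError was raised
def outerLoop (queries : PySem.Dict (List Char) (List Char)) (cs : List Char) :
    Option (PySem.Dict (List Char) (List Char)) :=
  match h : attrLoop queries [] cs with
  | .err => none
  | .done d => some d
  | .colon d attr rest =>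
    let r := critLoop d attr [] false rest
    outerLoop (if r.2.2.2 = true ∧ attr ≠ [] then emitPair r.1 attr r.2.1 else r.1) r.2.2.1
termination_by cs.length
decreasing_by
  exact lt_of_le_of_lt (critLoop_rest_le rest d attr [] false) (attrLoop_colon_lt cs queries [] d attr rest h)

def parse_spell_query_alt (string : String) : List (String × String) :=
  match outerLoop PySem.Dict.empty (string.toList ++ [' ']) with
  | some queries => queries.items.map (fun p => (String.ofList p.1, String.ofList p.2))
  | none => []  -- ValueError path (outside Pre_)

-- ===== PRECONDITION & SPEC =====
-- Pre_ admits EXACTLY the inputs on which Python A returns (it raises ValueError exactly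
-- when a '"' occurs with no colon pending): a quote/colon well-formedness scan over the
-- string, tracking only whether a colon is pending, whether the criteria so far is empty
-- and whether the current attribute word is rit/ritual (which decides if a quoted space
-- keeps the criteria empty); it carries no dictionary and produces no output.
def quotesOk (quote colon critEmpty : Bool) (word : List Char) : List Char → Bool
  | [] => true
  | c :: rest =>
    if c = ' ' then
      if quote = false ∧ critEmpty = false then quotesOk false false true [] rest
      else if colon = true ∧ quote = true ∧ isRitualWord word = false then
        quotesOk quote colon false word rest
      else quotesOk quote colon critEmpty word rest
    else if c = '"' then
      if colon then quotesOk (!quote) colon critEmpty word rest else false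
    else if c = ':' ∧ quote = false then quotesOk quote true critEmpty word rest
    else if colon then quotesOk quote colon false word rest
    else quotesOk quote colon critEmpty (word ++ [c]) rest

def Pre_parse_spell_query (string : String) : Prop :=
  quotesOk false false true [] string.toList = true
instance (string : String) : Decidable (Pre_parse_spell_query string) := by
  unfold Pre_parse_spell_query; infer_instance

def pvWitness_parse_spell_query : String := "n:fire rit t:\"hello world\""

def Spec_parse_spell_query (string : String) (out : List (String × String)) : Prop := out = parse_spell_query_alt string
instance (string : String) (out : List (String × String)) : Decidable (Spec_parse_spell_query string out) := by unfold Spec_parse_spell_query; infer_instance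

-- ===== CLAIM (what is proved, stated in full; the proofs are below) =====
def Claim_equal_parse_spell_query : Prop := ∀ (string : String), Dom_parse_spell_query string → Pre_parse_spell_query string → Spec_parse_spell_query string (parse_spell_query string)

-- ===== LEMMAS AND PROOFS =====

-- B's outer loop, generalised over the attribute accumulator (outerLoop starts it at [])
def outerFrom (queries : PySem.Dict (List Char) (List Char)) (attr : List Char) (cs : List Char) :
    Option (PySem.Dict (List Char) (List Char)) :=
  match attrLoop queries attr cs with
  | .err => none
  | .done d => some d
  | .colon d a rest =>
    let r := critLoop d a [] false rest
    outerLoop (if r.2.2.2 = true ∧ a ≠ [] then emitPair r.1 a r.2.1 else r.1) r.2.2.1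

theorem outerLoop_eq_outerFrom (d : PySem.Dict (List Char) (List Char)) (cs : List Char) :
    outerLoop d cs = outerFrom d [] cs := by
  rw [outerLoop]
  unfold outerFrom
  cases hA : attrLoop d [] cs <;> simp only [hA]

-- project the dict out of A's loop state
def projA (st : Bool × Bool × List Char × List Char × PySem.Dict (List Char) (List Char)) :
    PySem.Dict (List Char) (List Char) := st.2.2.2.2

theorem foldl_stepA_none : ∀ (cs : List Char), List.foldl stepA none cs = none := by
  intro cs
  induction cs with
  | nil => rfl
  | cons c r ih => simpa [stepA] using ih

theorem critLoop_not_terminated_rest : ∀ (cs : List Char) (d : PySem.Dict (List Char) (List Char))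
    (a cr : List Char) (q : Bool),
    (critLoop d a cr q cs).2.2.2 = false → (critLoop d a cr q cs).2.2.1 = [] := by
  intro cs
  induction cs with
  | nil => intro d a cr q _; simp [critLoop]
  | cons c rest ih =>
    intro d a cr q h
    simp only [critLoop] at *
    split_ifs at * <;> exact ih _ _ _ _ h

-- the criteria phase: A's fold from a colon-state tracks B's critLoop
theorem crit_phase : ∀ (cs : List Char) (d : PySem.Dict (List Char) (List Char))
    (q cr : List Char) (quoted : Bool),
    Option.map projA (List.foldl stepA (some (quoted, true, q, cr, d)) cs) =
      (if (critLoop d q cr quoted cs).2.2.2 = true then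
        Option.map projA (List.foldl stepA
          (some (false, false, [], [],
            if q ≠ [] then emitPair (critLoop d q cr quoted cs).1 q (critLoop d q cr quoted cs).2.1
            else (critLoop d q cr quoted cs).1)) (critLoop d q cr quoted cs).2.2.1)
       else some (critLoop d q cr quoted cs).1) := by
  intro cs
  induction cs with
  | nil => intro d q cr quoted; simp [critLoop, projA]
  | cons c rest ih =>
    intro d q cr quoted
    rw [List.foldl_cons]
    by_cases h1 : c = '"'
    · subst h1
      rw [show stepA (some (quoted, true, q, cr, d)) '"' = some (!quoted, true, q, cr, d) from by
            simp [stepA],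
          show critLoop d q cr quoted ('"' :: rest) = critLoop d q cr (!quoted) rest from by
            simp [critLoop]]
      exact ih d q cr (!quoted)
    · by_cases h2 : c = ' '
      · subst h2
        by_cases h3 : quoted = false ∧ cr ≠ []
        · -- the flush / token end
          rw [show stepA (some (quoted, true, q, cr, d)) ' '
                = some (quoted, false, [], [],
                    if q ≠ [] ∧ cr ≠ [] then
                      d.insert (PySem.Chars.lower (shortTable.getD q q)) (PySem.Chars.lower cr)
                    else d) from by simp [stepA, h3.1, h3.2],
              show critLoop d q cr quoted (' ' :: rest) = (d, cr, rest, true) from by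
                simp [critLoop, h3.1, h3.2]]
          obtain ⟨hq, hcr⟩ := h3
          subst hq
          simp [emitPair, hcr]
        · by_cases h4 : isRitualWord q = true
          · have h4' : q = "rit".toList ∨ q = "ritual".toList := by
              simpa [isRitualWord] using h4
            rw [show stepA (some (quoted, true, q, cr, d)) ' '
                  = some (quoted, true, q, cr, d.insert "ritual".toList "true".toList) from by
                    rcases h4' with h | h <;> subst h <;> simp [stepA, h3],
                show critLoop d q cr quoted (' ' :: rest)
                  = critLoop (d.insert "ritual".toList "true".toList) q cr quoted rest from by
                    simp [critLoop, h3, h4]]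
            exact ih _ q cr quoted
          · have h4' : ¬(q = "rit".toList ∨ q = "ritual".toList) := by
              simpa [isRitualWord] using h4
            simp only [not_or] at h4'
            have h41 : ¬q = ['r', 'i', 't'] := by simpa using h4'.1
            have h42 : ¬q = ['r', 'i', 't', 'u', 'a', 'l'] := by simpa using h4'.2
            by_cases h5 : quoted = true
            · subst h5
              rw [show stepA (some (true, true, q, cr, d)) ' '
                    = some (true, true, q, cr ++ [' '], d) from by simp [stepA, h41, h42],
                  show critLoop d q cr true (' ' :: rest)
                    = critLoop d q (cr ++ [' ']) true rest from by
                      simp [critLoop, isRitualWord, h41, h42]]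
              exact ih d q (cr ++ [' ']) true
            · have h5' : quoted = false := by revert h5; cases quoted <;> simp
              subst h5'
              have hcr : cr = [] := by
                by_contra hc; exact h3 ⟨rfl, hc⟩
              subst hcr
              rw [show stepA (some (false, true, q, [], d)) ' '
                    = some (false, true, q, [], d) from by simp [stepA, h41, h42],
                  show critLoop d q [] false (' ' :: rest)
                    = critLoop d q [] false rest from by
                      simp [critLoop, isRitualWord, h41, h42]]
              exact ih d q [] false
      · by_cases h6 : c = ':'
        · subst h6
          by_cases h5 : quoted = true
          · subst h5
            rw [show stepA (some (true, true, q, cr, d)) ':'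
                  = some (true, true, q, cr ++ [':'], d) from by simp [stepA],
                show critLoop d q cr true (':' :: rest)
                  = critLoop d q (cr ++ [':']) true rest from by simp [critLoop]]
            exact ih d q (cr ++ [':']) true
          · have h5' : quoted = false := by revert h5; cases quoted <;> simp
            subst h5'
            rw [show stepA (some (false, true, q, cr, d)) ':'
                  = some (false, true, q, cr, d) from by simp [stepA],
                show critLoop d q cr false (':' :: rest)
                  = critLoop d q cr false rest from by simp [critLoop]]
            exact ih d q cr false
        · rw [show stepA (some (quoted, true, q, cr, d)) c
                = some (quoted, true, q, cr ++ [c], d) from by simp [stepA, h1, h2, h6],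
              show critLoop d q cr quoted (c :: rest)
                = critLoop d q (cr ++ [c]) quoted rest from by simp [critLoop, h1, h2, h6]]
          exact ih d q (cr ++ [c]) quoted

-- one attrLoop step rewrites outerFrom (outerFrom is a plain match on attrLoop)
theorem outerFrom_step (d d' : PySem.Dict (List Char) (List Char)) (q q' : List Char)
    (cs cs' : List Char) (h : attrLoop d q cs = attrLoop d' q' cs') :
    outerFrom d q cs = outerFrom d' q' cs' := by
  unfold outerFrom
  rw [h]

-- the attribute phase: A's fold from an attribute-state computes B's outerFrom
theorem attr_phase : ∀ (n : Nat) (cs : List Char), cs.length ≤ n →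
    ∀ (d : PySem.Dict (List Char) (List Char)) (q : List Char),
    Option.map projA (List.foldl stepA (some (false, false, q, [], d)) cs) = outerFrom d q cs := by
  intro n
  induction n with
  | zero =>
    intro cs hlen d q
    rw [List.eq_nil_of_length_eq_zero (Nat.le_zero.mp hlen)]
    simp [outerFrom, attrLoop, projA]
  | succ n ih =>
    intro cs hlen d q
    cases cs with
    | nil => simp [outerFrom, attrLoop, projA]
    | cons c rest =>
      rw [List.foldl_cons]
      by_cases h1 : c = ':'
      · subst h1
        rw [show stepA (some (false, false, q, [], d)) ':' = some (false, true, q, [], d) from by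
              simp [stepA]]
        have hB : outerFrom d q (':' :: rest)
            = outerLoop (if (critLoop d q [] false rest).2.2.2 = true ∧ q ≠ [] then
                  emitPair (critLoop d q [] false rest).1 q (critLoop d q [] false rest).2.1
                else (critLoop d q [] false rest).1) (critLoop d q [] false rest).2.2.1 := by
          unfold outerFrom
          rw [show attrLoop d q (':' :: rest) = .colon d q rest from by simp [attrLoop]]
        rw [hB, crit_phase rest d q [] false]
        by_cases hfl : (critLoop d q [] false rest).2.2.2 = true
        · rw [if_pos hfl]
          have hlen' : (critLoop d q [] false rest).2.2.1.length ≤ n := by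
            have := critLoop_rest_le rest d q [] false
            simp at hlen
            omega
          rw [ih _ hlen', outerLoop_eq_outerFrom]
          simp [hfl]
        · rw [if_neg hfl]
          have hfl' : (critLoop d q [] false rest).2.2.2 = false := by
            revert hfl; cases (critLoop d q [] false rest).2.2.2 <;> simp
          rw [critLoop_not_terminated_rest rest d q [] false hfl']
          rw [outerLoop_eq_outerFrom]
          simp [hfl', outerFrom, attrLoop]
      · by_cases h2 : c = '"'
        · subst h2
          rw [show stepA (some (false, false, q, [], d)) '"' = none from by simp [stepA]]
          rw [show outerFrom d q ('"' :: rest) = none from by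
                unfold outerFrom
                rw [show attrLoop d q ('"' :: rest) = .err from by simp [attrLoop]]]
          simp [foldl_stepA_none]
        · by_cases h3 : c = ' '
          · subst h3
            rw [show stepA (some (false, false, q, [], d)) ' '
                  = some (false, false, q, [], ritualIf d q) from by
                    unfold ritualIf
                    split_ifs with h
                    · have h' : q = "rit".toList ∨ q = "ritual".toList := by
                        simpa [isRitualWord] using h
                      rcases h' with h' | h' <;> subst h' <;> simp [stepA]
                    · have h' : ¬(q = "rit".toList ∨ q = "ritual".toList) := by
                        simpa [isRitualWord] using h
                      simp only [not_or] at h'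
                      have hA1 : ¬q = ['r', 'i', 't'] := by simpa using h'.1
                      have hA2 : ¬q = ['r', 'i', 't', 'u', 'a', 'l'] := by simpa using h'.2
                      simp [stepA, hA1, hA2]]
            rw [outerFrom_step d (ritualIf d q) q q (' ' :: rest) rest (by simp [attrLoop])]
            exact ih rest (by simp at hlen; omega) (ritualIf d q) q
          · rw [show stepA (some (false, false, q, [], d)) c
                  = some (false, false, q ++ [c], [], d) from by simp [stepA, h1, h2, h3]]
            rw [outerFrom_step d d q (q ++ [c]) (c :: rest) rest (by simp [attrLoop, h1, h2, h3])]
            exact ih rest (by simp at hlen; omega) d (q ++ [c])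

-- ===== VERDICT (by name: the statement is the Claim_ definition above) =====
theorem parse_spell_query_spec : Claim_equal_parse_spell_query := by
  intro s _ _
  unfold Spec_parse_spell_query parse_spell_query parse_spell_query_alt
  have h := attr_phase (s.toList ++ [' ']).length (s.toList ++ [' ']) le_rfl PySem.Dict.empty []
  rw [← outerLoop_eq_outerFrom] at h
  cases hf : List.foldl stepA (some (false, false, [], [], PySem.Dict.empty)) (s.toList ++ [' ']) with
  | none =>
    rw [hf] at h
    simp at h
    rw [← h]
  | some st =>
    obtain ⟨q1, q2, q3, q4, dq⟩ := st
    rw [hf] at h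
    simp [projA] at h
    rw [← h]
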